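-- pv_equiv track=rewrite | github.com/pypi-data/pypi-mirror-134 | packages/numtext/numtext-0.1.0-py2.py3-none-any.whl/numtext/numtext.py | get_formatted_list
-- ===== SOURCE A (Python) =====
-- def get_formatted_list(raw_number):
--     raw_number_length = len(raw_number)
--     raw_number_length_mod_3 = raw_number_length % 3
--     formatted_number = f"{raw_number}"
--     n = 3
--
--     if raw_number_length_mod_3 != 0:
--         formatted_number = raw_number.rjust(raw_number_length + (3 - raw_number_length_mod_3), '0')
--
--     formatted_list = [formatted_number[i:i + n] for i in range(0, len(formatted_number), n)]
--
--     formatted_list.reverse()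
--
--     map_digits = []
--
--     for index, value in enumerate(formatted_list):
--         map_digits.append([index * 3, value])
--
--     return map_digits
-- ===== SOURCE B (Python) =====
-- def get_formatted_list(raw_number):
--     L = len(raw_number)
--     result = []
--     for i in range(0, L, 3):
--         chunk = raw_number[max(0, L - i - 3):L - i].rjust(3, '0')
--         result.append([i, chunk])
--     return result
-- ===== Notes on version B (the rewrite author's own statement) =====
-- stated objective: alternative
-- what changed: B replaces A's pad-whole-string / comprehension-chunk / reverse / enumerate pipeline with a single right-to-left loop over range(0, len, 3) that slices each 3-char group off the raw string and rjust-pads only that chunk, emitting the output already in final order.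
import Mathlib
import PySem

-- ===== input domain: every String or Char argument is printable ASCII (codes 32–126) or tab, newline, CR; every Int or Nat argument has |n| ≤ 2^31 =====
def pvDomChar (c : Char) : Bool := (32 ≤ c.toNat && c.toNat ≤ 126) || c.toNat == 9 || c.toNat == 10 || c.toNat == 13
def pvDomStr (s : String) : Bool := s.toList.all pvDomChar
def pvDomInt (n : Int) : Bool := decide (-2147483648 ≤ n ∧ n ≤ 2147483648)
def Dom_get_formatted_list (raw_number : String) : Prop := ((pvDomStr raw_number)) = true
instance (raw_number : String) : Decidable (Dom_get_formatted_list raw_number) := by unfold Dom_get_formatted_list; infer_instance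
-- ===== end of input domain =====

-- B builds the already-reversed output in one right-to-left pass over the raw string
-- (slice + per-chunk rjust), instead of A's pad-whole-string / chunk / reverse / enumerate
-- pipeline; same cost, different decomposition (objective: alternative).

-- shared port of Python's str.rjust(width, fill) (exact: pads on the left iff len < width)
def pvRjust (cs : List Char) (w : Int) (fill : Char) : List Char :=
  if (cs.length : Int) < w then List.replicate (w - cs.length).toNat fill ++ cs else cs

-- ===== PORT A =====
def pvA (cs : List Char) : List (Int × String) :=
  let raw_number_length : Int := cs.length
  let raw_number_length_mod_3 := PySem.Int.mod raw_number_length 3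
  let formatted_number := cs
  let formatted_number :=
    if raw_number_length_mod_3 ≠ 0 then
      pvRjust cs (raw_number_length + (3 - raw_number_length_mod_3)) '0'
    else formatted_number
  let formatted_list :=
    (PySem.List.pyRange 0 (formatted_number.length : Int) 3).map
      (fun i => PySem.List.slice formatted_number (some i) (some (i + 3)))
  let formatted_list := formatted_list.reverse
  (PySem.List.enumerate formatted_list).foldl
    (fun map_digits iv => map_digits ++ [(iv.1 * 3, String.ofList iv.2)]) []

def get_formatted_list (raw_number : String) : List (Int × String) :=
  pvA raw_number.toList

-- ===== PORT B =====
def pvB (cs : List Char) : List (Int × String) :=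
  let L : Int := cs.length
  (PySem.List.pyRange 0 L 3).foldl
    (fun result i =>
      result ++ [(i, String.ofList
        (pvRjust (PySem.List.slice cs (some (max 0 (L - i - 3))) (some (L - i))) 3 '0'))]) []

def get_formatted_list_alt (raw_number : String) : List (Int × String) :=
  pvB raw_number.toList

-- ===== PRECONDITION & SPEC =====
def Spec_get_formatted_list (raw_number : String) (out : List (Int × String)) : Prop := out = get_formatted_list_alt raw_number
instance (raw_number : String) (out : List (Int × String)) : Decidable (Spec_get_formatted_list raw_number out) := by unfold Spec_get_formatted_list; infer_instance

-- ===== CLAIM (what is proved, stated in full; the proofs are below) =====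
def Claim_equal_get_formatted_list : Prop := ∀ (raw_number : String), Dom_get_formatted_list raw_number → Spec_get_formatted_list raw_number (get_formatted_list raw_number)

-- ===== LEMMAS AND PROOFS =====

-- fold-append is map
theorem pv_foldl_app {α β : Type} (f : α → β) (xs : List α) (init : List β) :
    xs.foldl (fun acc x => acc ++ [f x]) init = init ++ xs.map f := by
  induction xs generalizing init with
  | nil => simp
  | cons x xs ih => simp [List.foldl_cons, ih]

-- enumerate from s is enumerate from 0 with shifted indices
theorem pv_enum_shift {α : Type} (xs : List α) (s : Int) :
    PySem.List.enumerate xs s = (PySem.List.enumerate xs 0).map (fun p => (p.1 + s, p.2)) := by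
  induction xs generalizing s with
  | nil => simp [PySem.List.enumerate_nil]
  | cons x xs ih =>
    rw [PySem.List.enumerate_cons, PySem.List.enumerate_cons, ih (s + 1), ih (0 + 1)]
    simp [List.map_map]
    intro p q _
    omega

-- the padded string A builds
def padC (cs : List Char) : List Char :=
  List.replicate ((3 - cs.length % 3) % 3) '0' ++ cs

theorem pv_mod_cast (n : Nat) : PySem.Int.mod (n : Int) 3 = ((n % 3 : Nat) : Int) := by
  simp [PySem.Int.mod, Int.fmod_eq_emod]

theorem pv_fmt_eq (cs : List Char) :
    (if PySem.Int.mod (cs.length : Int) 3 ≠ 0 then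
        pvRjust cs ((cs.length : Int) + (3 - PySem.Int.mod (cs.length : Int) 3)) '0'
      else cs) = padC cs := by
  rw [pv_mod_cast]
  by_cases h : cs.length % 3 = 0
  · simp [h, padC]
  · have h3 : cs.length % 3 < 3 := Nat.mod_lt _ (by omega)
    have hne : ((cs.length % 3 : Nat) : Int) ≠ 0 := by
      intro hc
      exact h (by exact_mod_cast hc)
    rw [if_pos hne]
    simp only [padC, pvRjust]
    rw [if_pos (by push_cast; omega)]
    congr 2
    push_cast
    omega

theorem padC_length (cs : List Char) : (padC cs).length % 3 = 0 := by
  simp [padC]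
  omega

theorem padC_append3 (cs : List Char) (a b c : Char) :
    padC (cs ++ [a, b, c]) = padC cs ++ [a, b, c] := by
  simp [padC, List.append_assoc]

-- slicing within the left part of an append
theorem pv_slice_append_left {α : Type} (xs ys : List α) (a b : Int)
    (ha : 0 ≤ a) (hab : a ≤ b) (hb : b ≤ (xs.length : Int)) :
    PySem.List.slice (xs ++ ys) (some a) (some b) = PySem.List.slice xs (some a) (some b) := by
  rw [PySem.List.slice_toNat _ ha (le_trans ha hab),
      PySem.List.slice_toNat _ ha (le_trans ha hab)]
  rw [List.drop_append_of_le_length (by omega)]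
  rw [List.take_append_of_le_length (by rw [List.length_drop]; omega)]

-- range(0, b, 3)
theorem pv_pyRange3 (b : Int) (hb : 0 ≤ b) :
    PySem.List.pyRange 0 b 3 = (List.range ((b + 2) / 3).toNat).map (fun (k : Nat) => 3 * (k : Int)) := by
  rw [PySem.List.pyRange_of_pos _ _ (by norm_num)]
  by_cases h : (0 : Int) < b
  · rw [if_pos h]
    have hc : ((b - 0 + 3 - 1) / 3).toNat = ((b + 2) / 3).toNat := by omega
    rw [hc]
    apply List.map_congr_left
    intro k _
    ring
  · rw [if_neg h]
    have hb0 : b = 0 := le_antisymm (not_lt.mp h) hb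
    simp [hb0]

-- A's chunk list, as a function of the (padded) string
def chunkList (xs : List Char) : List (List Char) :=
  (PySem.List.pyRange 0 (xs.length : Int) 3).map
    (fun i => PySem.List.slice xs (some i) (some (i + 3)))

theorem chunkList_closed (xs : List Char) :
    chunkList xs = (List.range (((xs.length : Int) + 2) / 3).toNat).map
      (fun (k : Nat) => PySem.List.slice xs (some (3 * (k : Int))) (some (3 * (k : Int) + 3))) := by
  unfold chunkList
  rw [pv_pyRange3 _ (by positivity), List.map_map]
  rfl

theorem chunkList_append3 (xs : List Char) (a b c : Char) (h : xs.length % 3 = 0) :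
    chunkList (xs ++ [a, b, c]) = chunkList xs ++ [[a, b, c]] := by
  rw [chunkList_closed, chunkList_closed]
  have hlen : (xs ++ [a, b, c]).length = xs.length + 3 := by simp
  have hq : ((((xs ++ [a, b, c]).length : Int)) + 2) / 3 = (((xs.length : Int)) + 2) / 3 + 1 := by
    rw [hlen]; push_cast; omega
  rw [hq]
  have hqn : ((((xs.length : Int)) + 2) / 3 + 1).toNat = ((((xs.length : Int)) + 2) / 3).toNat + 1 := by
    omega
  rw [hqn, List.range_succ, List.map_append]
  congr 1
  · apply List.map_congr_left
    intro k hk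
    simp only [List.mem_range] at hk
    apply pv_slice_append_left
    · positivity
    · omega
    · have : 3 * (k : Int) + 3 ≤ (xs.length : Int) := by omega
      exact this
  · simp only [List.map_cons, List.map_nil]
    congr 1
    have h1 : 3 * (((((xs.length : Int)) + 2) / 3).toNat : Int) = (xs.length : Int) := by omega
    rw [h1]
    rw [PySem.List.slice_toNat _ (by positivity) (by positivity)]
    have h2 : ((xs.length : Int)).toNat = xs.length := by omega
    rw [h2, List.drop_left]
    have h3 : (((xs.length : Int)) + 3).toNat - xs.length = 3 := by omega
    rw [h3]
    rfl

-- characterization of A through the padded string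
theorem pvA_char (cs : List Char) :
    pvA cs = (PySem.List.enumerate (chunkList (padC cs)).reverse).map
      (fun iv => (iv.1 * 3, String.ofList iv.2)) := by
  simp only [pvA]
  rw [pv_fmt_eq, pv_foldl_app]
  rfl

-- step lemma for A
theorem pvA_step (front : List Char) (a b c : Char) :
    pvA (front ++ [a, b, c]) =
      (0, String.ofList [a, b, c]) :: (pvA front).map (fun p => (p.1 + 3, p.2)) := by
  rw [pvA_char, pvA_char, padC_append3, chunkList_append3 _ _ _ _ (padC_length front)]
  rw [List.reverse_append]
  simp only [List.reverse_cons, List.reverse_nil, List.nil_append, List.singleton_append]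
  rw [PySem.List.enumerate_cons, List.map_cons]
  congr 1
  rw [pv_enum_shift _ (0 + 1), List.map_map, List.map_map]
  apply List.map_congr_left
  intro p _
  simp
  ring

-- step lemma for B
theorem pvB_closed (cs : List Char) :
    pvB cs = (List.range ((((cs.length : Int)) + 2) / 3).toNat).map
      (fun (k : Nat) => (3 * (k : Int), String.ofList
        (pvRjust (PySem.List.slice cs (some (max 0 ((cs.length : Int) - 3 * (k : Int) - 3)))
          (some ((cs.length : Int) - 3 * (k : Int)))) 3 '0'))) := by
  simp only [pvB]
  rw [pv_foldl_app, pv_pyRange3 _ (by positivity), List.map_map]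
  rfl

theorem pvB_step (front : List Char) (a b c : Char) :
    pvB (front ++ [a, b, c]) =
      (0, String.ofList [a, b, c]) :: (pvB front).map (fun p => (p.1 + 3, p.2)) := by
  rw [pvB_closed, pvB_closed]
  have hlen : (front ++ [a, b, c]).length = front.length + 3 := by simp
  have hq : ((((front ++ [a, b, c]).length : Int)) + 2) / 3 = (((front.length : Int)) + 2) / 3 + 1 := by
    rw [hlen]; push_cast; omega
  rw [hq]
  have hqn : ((((front.length : Int)) + 2) / 3 + 1).toNat = ((((front.length : Int)) + 2) / 3).toNat + 1 := by
    omega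
  rw [hqn, List.range_succ_eq_map, List.map_cons, List.map_map, List.map_map]
  congr 1
  · -- head: the last three characters, rjust is the identity on a length-3 chunk
    have hL : ((front ++ [a, b, c]).length : Int) = (front.length : Int) + 3 := by
      rw [hlen]; push_cast; ring
    rw [hL]
    have h0 : max 0 ((front.length : Int) + 3 - 3 * ((0 : Nat) : Int) - 3) = (front.length : Int) := by
      simp
    have h1 : (front.length : Int) + 3 - 3 * ((0 : Nat) : Int) = (front.length : Int) + 3 := by
      simp
    rw [h0, h1]
    rw [PySem.List.slice_toNat _ (by positivity) (by positivity)]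
    have h2 : ((front.length : Int)).toNat = front.length := by omega
    rw [h2, List.drop_left]
    have h3 : ((front.length : Int) + 3).toNat - front.length = 3 := by omega
    rw [h3]
    have h4 : pvRjust [a, b, c] 3 '0' = [a, b, c] := by simp [pvRjust]
    simp [h4]
  · apply List.map_congr_left
    intro k hk
    simp only [List.mem_range] at hk
    have hL : ((front ++ [a, b, c]).length : Int) = (front.length : Int) + 3 := by
      rw [hlen]; push_cast; ring
    rw [hL]
    simp only [Function.comp_apply, Nat.succ_eq_add_one]
    push_cast
    have e1 : (front.length : Int) + 3 - 3 * ((k : Int) + 1) - 3 = (front.length : Int) - 3 * (k : Int) - 3 := by ring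
    have e2 : (front.length : Int) + 3 - 3 * ((k : Int) + 1) = (front.length : Int) - 3 * (k : Int) := by ring
    rw [e1, e2]
    have hk3 : 3 * (k : Int) < (front.length : Int) := by omega
    have hslice : PySem.List.slice (front ++ [a, b, c])
        (some (max 0 ((front.length : Int) - 3 * (k : Int) - 3)))
        (some ((front.length : Int) - 3 * (k : Int)))
        = PySem.List.slice front
        (some (max 0 ((front.length : Int) - 3 * (k : Int) - 3)))
        (some ((front.length : Int) - 3 * (k : Int))) := by
      apply pv_slice_append_left
      · exact le_max_left _ _
      · omega
      · omega
    rw [hslice, mul_add, mul_one]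

-- small cases
theorem pvA_nil : pvA [] = [] := by decide
theorem pvB_nil : pvB [] = [] := by decide
theorem pvA_one (a : Char) : pvA [a] = [(0, String.ofList ['0', '0', a])] := by
  simp [pvA, pvRjust, PySem.Int.mod, PySem.List.pyRange, PySem.List.slice, PySem.List.enumerate]
theorem pvB_one (a : Char) : pvB [a] = [(0, String.ofList ['0', '0', a])] := by
  simp [pvB, pvRjust, PySem.List.pyRange, PySem.List.slice]
theorem pvA_two (a b : Char) : pvA [a, b] = [(0, String.ofList ['0', a, b])] := by
  simp [pvA, pvRjust, PySem.Int.mod, PySem.List.pyRange, PySem.List.slice, PySem.List.enumerate]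
theorem pvB_two (a b : Char) : pvB [a, b] = [(0, String.ofList ['0', a, b])] := by
  simp [pvB, pvRjust, PySem.List.pyRange, PySem.List.slice]

theorem pv_main : ∀ (cs : List Char), pvA cs = pvB cs := by
  have key : ∀ (n : Nat) (cs : List Char), cs.length = n → pvA cs = pvB cs := by
    intro n
    induction n using Nat.strong_induction_on with
    | _ n ih =>
      intro cs hlen
      match cs, n, hlen with
      | [], _, hlen => exact pvA_nil.trans pvB_nil.symm
      | [a], _, hlen => exact (pvA_one a).trans (pvB_one a).symm
      | [a, b], _, hlen => exact (pvA_two a b).trans (pvB_two a b).symm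
      | (x :: y :: z :: rest), n, hlen =>
        have h3 : 3 ≤ (x :: y :: z :: rest).length := by simp
        set cs := x :: y :: z :: rest with hcs
        have hdecomp : cs = cs.take (cs.length - 3) ++ cs.drop (cs.length - 3) :=
          (List.take_append_drop _ _).symm
        have hdl : (cs.drop (cs.length - 3)).length = 3 := by
          rw [List.length_drop]; omega
        obtain ⟨a, b, c, habc⟩ := List.length_eq_three.mp hdl
        have hfl : (cs.take (cs.length - 3)).length = cs.length - 3 := by
          rw [List.length_take]; omega
        have hrec : pvA (cs.take (cs.length - 3)) = pvB (cs.take (cs.length - 3)) := by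
          apply ih (cs.length - 3) (by omega)
          exact hfl.trans (by omega)
        calc pvA cs = pvA (cs.take (cs.length - 3) ++ [a, b, c]) := by rw [← habc, ← hdecomp]
          _ = (0, String.ofList [a, b, c]) ::
                (pvA (cs.take (cs.length - 3))).map (fun p => (p.1 + 3, p.2)) := pvA_step _ _ _ _
          _ = (0, String.ofList [a, b, c]) ::
                (pvB (cs.take (cs.length - 3))).map (fun p => (p.1 + 3, p.2)) := by rw [hrec]
          _ = pvB (cs.take (cs.length - 3) ++ [a, b, c]) := (pvB_step _ _ _ _).symm
          _ = pvB cs := by rw [← habc, ← hdecomp]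
  intro cs
  exact key cs.length cs rfl

-- ===== VERDICT (by name: the statement is the Claim_ definition above) =====
theorem get_formatted_list_spec : Claim_equal_get_formatted_list := by
  intro raw_number _
  unfold Spec_get_formatted_list get_formatted_list get_formatted_list_alt
  exact pv_main raw_number.toList
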